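-- pv_equiv track=rewrite | github.com/rodehyde/arc-agi-solver | src/categories/transform_features.py | _is_collinear
-- ===== SOURCE A (Python) =====
-- def _is_collinear(cells: list[tuple[int, int]]) -> bool:
--     """True if all cells lie on one horizontal, vertical, or diagonal line."""
--     if len(cells) <= 1:
--         return True
--     rows = [r for r, c in cells]
--     cols = [c for r, c in cells]
--     if len(set(rows)) == 1:                          # horizontal
--         return True
--     if len(set(cols)) == 1:                          # vertical
--         return True
--     if len(set(r - c for r, c in cells)) == 1:      # diagonal (\)
--         return True
--     if len(set(r + c for r, c in cells)) == 1:      # anti-diagonal (/)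
--         return True
--     return False
-- ===== SOURCE B (Python) =====
-- def _is_collinear(cells: list[tuple[int, int]]) -> bool:
--     """True if all cells lie on one horizontal, vertical, or diagonal line.
--
--     Determines the candidate line from the first pair of distinct cells:
--     its direction vector must be horizontal, vertical or diagonal, and every
--     cell must pass a cross-product collinearity test against that line.
--     """
--     if not cells:
--         return True
--     r0, c0 = cells[0]
--     dr = dc = 0
--     for r, c in cells:
--         if (r, c) != (r0, c0):
--             dr, dc = r - r0, c - c0
--             break
--     if dr == 0 and dc == 0:
--         return True          # at most one distinct cell
--     if dr != 0 and dc != 0 and dr != dc and dr != -dc: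
--         return False         # direction not horizontal/vertical/diagonal
--     return all((r - r0) * dc == (c - c0) * dr for r, c in cells)
-- ===== Notes on version B (the rewrite author's own statement) =====
-- stated objective: alternative
-- what changed: Instead of testing four all-equal conditions (rows, cols, r-c, r+c) via set cardinalities, B determines the candidate line from the first pair of distinct cells, checks its direction vector is horizontal/vertical/diagonal, and verifies every cell with a cross-product collinearity test against that line.
import Mathlib
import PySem

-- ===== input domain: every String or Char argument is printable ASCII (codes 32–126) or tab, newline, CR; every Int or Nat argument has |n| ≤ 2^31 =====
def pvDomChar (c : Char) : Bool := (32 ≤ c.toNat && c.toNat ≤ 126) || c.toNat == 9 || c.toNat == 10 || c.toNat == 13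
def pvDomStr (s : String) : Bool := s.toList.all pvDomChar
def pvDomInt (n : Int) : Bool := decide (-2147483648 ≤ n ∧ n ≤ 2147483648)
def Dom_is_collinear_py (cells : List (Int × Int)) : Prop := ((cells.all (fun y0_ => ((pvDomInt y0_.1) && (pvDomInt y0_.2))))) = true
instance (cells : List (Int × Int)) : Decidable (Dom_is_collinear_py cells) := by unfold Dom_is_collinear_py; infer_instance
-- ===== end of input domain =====

-- B replaces A's four set-cardinality tests by a different algorithm: it derives the
-- candidate line from the first pair of distinct cells, checks its direction vector is
-- horizontal/vertical/diagonal, and verifies every cell with a cross-product test.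

-- ===== PORT A =====
def is_collinear_py (cells : List (Int × Int)) : Bool :=
  if cells.length ≤ 1 then true
  else
    let rows := cells.map (fun p => p.1)
    let cols := cells.map (fun p => p.2)
    if (PySem.Set.ofList rows).length == 1 then true
    else if (PySem.Set.ofList cols).length == 1 then true
    else if (PySem.Set.ofList (cells.map (fun p => p.1 - p.2))).length == 1 then true
    else if (PySem.Set.ofList (cells.map (fun p => p.1 + p.2))).length == 1 then true
    else false

-- ===== PORT B =====
-- the break-loop of Source B: first cell differing from (r0,c0), returned as a direction
def pvFindDir (r0 c0 : Int) : List (Int × Int) → Int × Int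
  | [] => (0, 0)
  | (r, c) :: t => if r == r0 && c == c0 then pvFindDir r0 c0 t else (r - r0, c - c0)

def is_collinear_py_alt (cells : List (Int × Int)) : Bool :=
  match cells with
  | [] => true
  | (r0, c0) :: _ =>
    let d := pvFindDir r0 c0 cells
    if d.1 == 0 && d.2 == 0 then true
    else if d.1 != 0 && d.2 != 0 && d.1 != d.2 && d.1 != -d.2 then false
    else cells.all (fun p => (p.1 - r0) * d.2 == (p.2 - c0) * d.1)

-- ===== PRECONDITION & SPEC =====
def Spec_is_collinear_py (cells : List (Int × Int)) (out : Bool) : Prop := out = is_collinear_py_alt cells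
instance (cells : List (Int × Int)) (out : Bool) : Decidable (Spec_is_collinear_py cells out) := by unfold Spec_is_collinear_py; infer_instance

-- ===== CLAIM (what is proved, stated in full; the proofs are below) =====
def Claim_equal_is_collinear_py : Prop := ∀ (cells : List (Int × Int)), Dom_is_collinear_py cells → Spec_is_collinear_py cells (is_collinear_py cells)

-- ===== LEMMAS AND PROOFS =====

-- set(a :: t) has one element iff every member of t is a.
theorem pv_set_len_one {α : Type} [DecidableEq α] (a : α) (t : List α) :
    ((PySem.Set.ofList (a :: t)).length = 1) ↔ (∀ x ∈ t, x = a) := by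
  have hmem : ∀ x, x ∈ PySem.Set.ofList (a :: t) ↔ x ∈ a :: t := by
    intro x; exact PySem.Set.mem_ofList _ _
  have hnd : (PySem.Set.ofList (a :: t)).Nodup := PySem.Set.nodup_ofList _
  constructor
  · intro hlen x hx
    rcases List.length_eq_one_iff.mp hlen with ⟨b, hb⟩
    have ha : a ∈ PySem.Set.ofList (a :: t) := (hmem a).mpr List.mem_cons_self
    have hxm : x ∈ PySem.Set.ofList (a :: t) := (hmem x).mpr (List.mem_cons_of_mem a hx)
    rw [hb] at ha hxm
    simp only [List.mem_singleton] at ha hxm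
    rw [hxm, ← ha]
  · intro hall
    have hsub : ∀ x ∈ PySem.Set.ofList (a :: t), x = a := by
      intro x hx
      rcases List.mem_cons.mp ((hmem x).mp hx) with h | h
      · exact h
      · exact hall x h
    cases hs : PySem.Set.ofList (a :: t) with
    | nil =>
      have : a ∈ PySem.Set.ofList (a :: t) := (hmem a).mpr List.mem_cons_self
      rw [hs] at this; simp at this
    | cons b l =>
      cases hl : l with
      | nil => simp
      | cons c l' =>
        exfalso
        rw [hl] at hs
        have hb : b = a := hsub b (by rw [hs]; simp)
        have hc : c = a := hsub c (by rw [hs]; simp)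
        rw [hs] at hnd
        simp [hb, hc] at hnd

-- Bool form of pv_set_len_one for a mapped coordinate.
theorem pv_set_len_one_all (f : Int × Int → Int) (a : Int × Int) (t : List (Int × Int)) :
    ((PySem.Set.ofList ((a :: t).map f)).length == 1) = t.all (fun p => f p == f a) := by
  simp only [List.map_cons]
  rw [Bool.eq_iff_iff, beq_iff_eq, pv_set_len_one, List.all_eq_true]
  constructor
  · intro h p hp
    simpa using h (f p) (List.mem_map_of_mem hp)
  · intro h x hx
    rcases List.mem_map.mp hx with ⟨p, hp, rfl⟩
    simpa using h p hp

-- A's value on a nonempty list is the disjunction of four all-conditions on the tail.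
theorem pvA_char (r0 c0 : Int) (t : List (Int × Int)) :
    is_collinear_py ((r0, c0) :: t)
      = (t.all (fun p => p.1 == r0) || t.all (fun p => p.2 == c0)
          || t.all (fun p => p.1 - p.2 == r0 - c0)
          || t.all (fun p => p.1 + p.2 == r0 + c0)) := by
  cases t with
  | nil => simp [is_collinear_py]
  | cons p rest =>
    have h1 := pv_set_len_one_all (fun p => p.1) (r0, c0) (p :: rest)
    have h2 := pv_set_len_one_all (fun p => p.2) (r0, c0) (p :: rest)
    have h3 := pv_set_len_one_all (fun p => p.1 - p.2) (r0, c0) (p :: rest)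
    have h4 := pv_set_len_one_all (fun p => p.1 + p.2) (r0, c0) (p :: rest)
    simp only [is_collinear_py, List.length_cons, h1, h2, h3, h4]
    have hlen : ¬ (rest.length + 1 + 1 ≤ 1) := by omega
    rw [if_neg hlen]
    cases hx1 : (p :: rest).all (fun p => p.1 == r0)
      <;> cases hx2 : (p :: rest).all (fun p => p.2 == c0)
      <;> cases hx3 : (p :: rest).all (fun p => p.1 - p.2 == r0 - c0)
      <;> cases hx4 : (p :: rest).all (fun p => p.1 + p.2 == r0 + c0)
      <;> simp

-- pvFindDir either finds no distinct cell, or returns the offset of a member cell.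
theorem pvFindDir_spec (r0 c0 : Int) (l : List (Int × Int)) :
    (pvFindDir r0 c0 l = (0, 0) ∧ ∀ p ∈ l, p = (r0, c0))
    ∨ (∃ p ∈ l, p ≠ (r0, c0) ∧ pvFindDir r0 c0 l = (p.1 - r0, p.2 - c0)) := by
  induction l with
  | nil => exact Or.inl ⟨rfl, by simp⟩
  | cons q t ih =>
    obtain ⟨r, c⟩ := q
    by_cases hq : r = r0 ∧ c = c0
    · obtain ⟨rfl, rfl⟩ := hq
      have hstep : pvFindDir r c ((r, c) :: t) = pvFindDir r c t := by
        simp [pvFindDir]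
      rcases ih with ⟨h0, hall⟩ | ⟨p, hp, hne, hd⟩
      · exact Or.inl ⟨hstep ▸ h0, by
          intro p hp
          rcases List.mem_cons.mp hp with h | h
          · exact h
          · exact hall p h⟩
      · exact Or.inr ⟨p, List.mem_cons_of_mem _ hp, hne, hstep ▸ hd⟩
    · refine Or.inr ⟨(r, c), List.mem_cons_self, by simpa using hq, ?_⟩
      have : ¬ ((r == r0) && (c == c0)) = true := by
        simp only [Bool.and_eq_true, beq_iff_eq]; exact hq
      simp [pvFindDir, this]

-- ===== VERDICT (by name: the statement is the Claim_ definition above) =====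
theorem is_collinear_py_spec : Claim_equal_is_collinear_py := by
  intro cells _
  unfold Spec_is_collinear_py
  cases cells with
  | nil => rfl
  | cons hd t =>
    obtain ⟨r0, c0⟩ := hd
    rw [pvA_char]
    have hcons : pvFindDir r0 c0 ((r0, c0) :: t) = pvFindDir r0 c0 t := by
      simp [pvFindDir]
    rcases pvFindDir_spec r0 c0 t with ⟨h0, hall⟩ | ⟨p, hp, hne, hd⟩
    · -- no distinct cell in the tail: both sides are true
      have hrow : t.all (fun p => p.1 == r0) = true := by
        rw [List.all_eq_true]; intro q hq; simp [hall q hq]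
      simp [is_collinear_py_alt, hcons, h0, hrow]
    · -- the tail has a distinct member p giving direction (dr, dc)
      set dr := p.1 - r0 with hdr
      set dc := p.2 - c0 with hdc
      have hnz : ¬ (dr = 0 ∧ dc = 0) := by
        intro ⟨h1, h2⟩
        exact hne (Prod.ext (by omega) (by omega))
      by_cases hqual : dr ≠ 0 ∧ dc ≠ 0 ∧ dr ≠ dc ∧ dr ≠ -dc
      · -- inadmissible direction: B is false, and every all-condition fails at p
        obtain ⟨q1, q2, q3, q4⟩ := hqual
        have halt : is_collinear_py_alt ((r0, c0) :: t) = false := by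
          simp only [is_collinear_py_alt, hcons, hd]
          rw [if_neg (by simp only [Bool.and_eq_true, beq_iff_eq]; exact hnz)]
          rw [if_pos (by simp only [Bool.and_eq_true, bne_iff_ne]; tauto)]
        rw [halt]
        have f1 : t.all (fun p => p.1 == r0) = false := by
          cases hxx : t.all (fun p => p.1 == r0) with
          | false => rfl
          | true => exfalso; have := (List.all_eq_true.mp hxx) p hp; simp at this; omega
        have f2 : t.all (fun p => p.2 == c0) = false := by
          cases hxx : t.all (fun p => p.2 == c0) with
          | false => rfl
          | true => exfalso; have := (List.all_eq_true.mp hxx) p hp; simp at this; omega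
        have f3 : t.all (fun p => p.1 - p.2 == r0 - c0) = false := by
          cases hxx : t.all (fun p => p.1 - p.2 == r0 - c0) with
          | false => rfl
          | true => exfalso; have := (List.all_eq_true.mp hxx) p hp; simp at this; omega
        have f4 : t.all (fun p => p.1 + p.2 == r0 + c0) = false := by
          cases hxx : t.all (fun p => p.1 + p.2 == r0 + c0) with
          | false => rfl
          | true => exfalso; have := (List.all_eq_true.mp hxx) p hp; simp at this; omega
        simp [f1, f2, f3, f4]
      · -- admissible direction: four-or ↔ cross-product test on every cell
        have halt : is_collinear_py_alt ((r0, c0) :: t)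
            = ((r0, c0) :: t).all (fun q => (q.1 - r0) * dc == (q.2 - c0) * dr) := by
          simp only [is_collinear_py_alt, hcons, hd]
          rw [if_neg (by simp only [Bool.and_eq_true, beq_iff_eq]; exact hnz)]
          rw [if_neg (by simp only [Bool.and_eq_true, bne_iff_ne]; tauto)]
        rw [halt, Bool.eq_iff_iff]
        simp only [Bool.or_eq_true, List.all_eq_true, beq_iff_eq, List.mem_cons]
        constructor
        · rintro (((h | h) | h) | h) <;>
          · intro q hq
            rcases hq with rfl | hq
            · simp
            · have hqv := h q hq
              have hpv := h p hp
              rw [hdr, hdc]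
              first
                | linear_combination (p.2 - c0) * hqv - (q.2 - c0) * hpv
                | linear_combination (q.1 - r0) * hpv - (p.1 - r0) * hqv
        · intro h
          have hx : ∀ q ∈ t, (q.1 - r0) * dc = (q.2 - c0) * dr := by
            intro q hq; exact h q (Or.inr hq)
          push Not at hqual
          by_cases h1 : dr = 0
          · have hdc0 : dc ≠ 0 := fun hc => hnz ⟨h1, hc⟩
            refine Or.inl (Or.inl (Or.inl ?_))
            intro q hq
            have hq1 : (q.1 - r0) * dc = 0 := by
              have := hx q hq; rw [h1] at this; omega
            rcases mul_eq_zero.mp hq1 with h | h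
            · omega
            · exact absurd h hdc0
          by_cases h2 : dc = 0
          · refine Or.inl (Or.inl (Or.inr ?_))
            intro q hq
            have hq1 : (q.2 - c0) * dr = 0 := by
              have := hx q hq; rw [h2] at this; omega
            rcases mul_eq_zero.mp hq1 with h | h
            · omega
            · exact absurd h h1
          by_cases h3 : dr = dc
          · refine Or.inl (Or.inr ?_)
            intro q hq
            have hq1 : (q.1 - q.2 - (r0 - c0)) * dc = 0 := by
              linear_combination (hx q hq) + (q.2 - c0) * h3
            rcases mul_eq_zero.mp hq1 with h | h
            · omega
            · exact absurd h h2
          · have h4 : dr = -dc := hqual h1 h2 h3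
            refine Or.inr ?_
            intro q hq
            have hq1 : (q.1 + q.2 - (r0 + c0)) * dc = 0 := by
              linear_combination (hx q hq) + (q.2 - c0) * h4
            rcases mul_eq_zero.mp hq1 with h | h
            · omega
            · exact absurd h h2
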